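-- pv_equiv track=rewrite | github.com/ShajahanAI/codewars | python/7 kyu/294.py | size_to_number
-- ===== SOURCE A (Python) =====
-- def size_to_number(size):
--     if len(size) == 0:
--         return None
--
--     base = size[-1]
--     base_to_size_dict = {
--                          "s": 36,
--                          "m": 38,
--                          "l": 40
--                         }
--     if base not in base_to_size_dict:
--         return None
--
--     if base == "m" and len(size) > 1:
--         return None
--
--     size_value = base_to_size_dict[base]
--     if len(size) > 1:
--         for modifier in size[:-1]:
--             if modifier != "x":
--                 return None
--
--             if base == "l":
--                 size_value += 2
--             elif base == "s":
--                 size_value -= 2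
--
--     return size_value
-- ===== SOURCE B (Python) =====
-- def size_to_number(size):
--     if not size:
--         return None
--     base, n = size[-1], len(size) - 1
--     if size != "x" * n + base:
--         return None
--     if base == "s":
--         return 36 - 2 * n
--     if base == "m" and n == 0:
--         return 38
--     if base == "l":
--         return 40 + 2 * n
--     return None
-- ===== Notes on version B (the rewrite author's own statement) =====
-- stated objective: simpler
-- what changed: Replaces the per-character accumulation loop and dict lookup with one whole-string equality check against the expected prefix-of-x-characters form and a closed-form value (36-2n / 38 / 40+2n).
import Mathlib
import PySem

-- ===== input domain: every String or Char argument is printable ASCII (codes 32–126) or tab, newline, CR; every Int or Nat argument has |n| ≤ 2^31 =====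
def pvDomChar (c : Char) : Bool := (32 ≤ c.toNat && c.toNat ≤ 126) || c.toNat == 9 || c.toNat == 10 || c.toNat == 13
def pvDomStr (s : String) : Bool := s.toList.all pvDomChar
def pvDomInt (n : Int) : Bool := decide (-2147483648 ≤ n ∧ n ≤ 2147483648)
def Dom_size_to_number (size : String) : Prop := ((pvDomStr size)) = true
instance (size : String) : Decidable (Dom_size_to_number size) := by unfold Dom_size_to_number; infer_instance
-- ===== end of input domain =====

-- B replaces A's per-character accumulation loop with a whole-string equality check
-- against 'x'*n ++ base and a closed-form value (simpler; same asymptotic cost).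

-- ===== PORT A =====
-- the 'for modifier in size[:-1]' loop with its early return and accumulator
def sizeLoopA (base : Char) : List Char → Int → Option Int
  | [], acc => some acc
  | m :: rest, acc =>
    if m ≠ 'x' then none
    else if base = 'l' then sizeLoopA base rest (acc + 2)
    else if base = 's' then sizeLoopA base rest (acc - 2)
    else sizeLoopA base rest acc

def size_to_number (size : String) : Option Int :=
  let l := size.toList
  if l.length = 0 then none
  else
    match PySem.List.pyGet? l (-1) with        -- size[-1]; some, since l ≠ []
    | none => none
    | some base =>
      let d : PySem.Dict Char Int := PySem.Dict.ofList [('s', 36), ('m', 38), ('l', 40)]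
      if (PySem.Dict.get? d base).isNone then none
      else if base = 'm' ∧ l.length > 1 then none
      else
        let sv := (PySem.Dict.get? d base).getD 0   -- base_to_size_dict[base], key present here
        if l.length > 1 then sizeLoopA base l.dropLast sv   -- size[:-1] = dropLast
        else some sv

-- ===== PORT B =====
def size_to_number_alt (size : String) : Option Int :=
  let l := size.toList
  if l = [] then none
  else
    match PySem.List.pyGet? l (-1) with        -- size[-1]; some, since l ≠ []
    | none => none
    | some base =>
      let n := l.length - 1
      if l ≠ List.replicate n 'x' ++ [base] then none   -- size != "x"*n + base
      else if base = 's' then some (36 - 2 * (n : Int))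
      else if base = 'm' ∧ n = 0 then some 38
      else if base = 'l' then some (40 + 2 * (n : Int))
      else none

-- ===== PRECONDITION & SPEC =====
def Spec_size_to_number (size : String) (out : Option Int) : Prop := out = size_to_number_alt size
instance (size : String) (out : Option Int) : Decidable (Spec_size_to_number size out) := by unfold Spec_size_to_number; infer_instance

-- ===== CLAIM (what is proved, stated in full; the proofs are below) =====
def Claim_equal_size_to_number : Prop := ∀ (size : String), Dom_size_to_number size → Spec_size_to_number size (size_to_number size)

-- ===== LEMMAS AND PROOFS =====

theorem sizeLoopA_s (pre : List Char) (acc : Int) :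
    sizeLoopA 's' pre acc =
      if pre = List.replicate pre.length 'x' then some (acc - 2 * pre.length) else none := by
  induction pre generalizing acc with
  | nil => simp [sizeLoopA]
  | cons m rest ih =>
      simp only [sizeLoopA, List.length_cons, List.replicate_succ]
      by_cases hm : m = 'x'
      · subst hm
        simp [ih]
        split_ifs <;> simp <;> push_cast <;> ring
      · simp [hm]

theorem sizeLoopA_l (pre : List Char) (acc : Int) :
    sizeLoopA 'l' pre acc =
      if pre = List.replicate pre.length 'x' then some (acc + 2 * pre.length) else none := by
  induction pre generalizing acc with
  | nil => simp [sizeLoopA]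
  | cons m rest ih =>
      simp only [sizeLoopA, List.length_cons, List.replicate_succ]
      by_cases hm : m = 'x'
      · subst hm
        simp [ih]
        split_ifs <;> simp <;> push_cast <;> ring
      · simp [hm]

theorem core_eq (l : List Char) :
    size_to_number (String.ofList l) = size_to_number_alt (String.ofList l) := by
  have hd : PySem.Dict.ofList [('s', (36:Int)), ('m', 38), ('l', 40)]
      = PySem.Dict.mk [('s', 36), ('m', 38), ('l', 40)] := rfl
  induction l using List.reverseRecOn with
  | nil => decide
  | append_singleton xs b _ =>
      simp only [size_to_number, size_to_number_alt, String.toList_ofList, hd]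
      rw [PySem.List.pyGet?_neg_one_append_singleton]
      by_cases hb : b = 's'
      · subst hb
        cases xs with
        | nil => decide
        | cons y ys =>
            simp only [PySem.Dict.get?_mk_cons, List.dropLast_concat]
            norm_num [sizeLoopA_s]
            have hiff : (y :: (ys ++ ['s']) = List.replicate (ys.length + 1) 'x' ++ ['s'])
                ↔ (y :: ys = List.replicate (ys.length + 1) 'x') := by
              constructor
              · intro h; rw [← List.cons_append] at h; exact List.append_cancel_right h
              · intro h; rw [← List.cons_append, h]
            simp only [hiff]
            split_ifs <;> simp_all
      · by_cases hb2 : b = 'm'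
        · subst hb2
          cases xs with
          | nil => decide
          | cons y ys =>
              simp only [PySem.Dict.get?_mk_cons, hb]
              simp
        · by_cases hb3 : b = 'l'
          · subst hb3
            cases xs with
            | nil => decide
            | cons y ys =>
                simp only [PySem.Dict.get?_mk_cons, List.dropLast_concat]
                norm_num [sizeLoopA_l, hb, hb2]
                have hiff : (y :: (ys ++ ['l']) = List.replicate (ys.length + 1) 'x' ++ ['l'])
                    ↔ (y :: ys = List.replicate (ys.length + 1) 'x') := by
                  constructor
                  · intro h; rw [← List.cons_append] at h; exact List.append_cancel_right h
                  · intro h; rw [← List.cons_append, h]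
                simp only [hiff]
                split_ifs <;> simp_all
          · simp only [PySem.Dict.get?_mk_cons, beq_iff_eq]
            rw [if_neg (fun h : 's' = b => hb h.symm), if_neg (fun h : 'm' = b => hb2 h.symm),
              if_neg (fun h : 'l' = b => hb3 h.symm)]
            simp [PySem.Dict.get?, hb, hb2, hb3]

-- ===== VERDICT (by name: the statement is the Claim_ definition above) =====
theorem size_to_number_spec : Claim_equal_size_to_number := by
  intro size _
  unfold Spec_size_to_number
  have := core_eq size.toList
  simpa [String.ofList_toList] using this
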